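-- pv_equiv track=rewrite | github.com/zejiran/python-for-cats | !awesome_challenges/challenges_vol3.py | encontrar_menor
-- ===== SOURCE A (Python) =====
-- def encontrar_menor(entrada: list) -> int:
--     """ Encontrar el elemento menor
--     Parámetros:
--       entrada (list): La lista
--     Retorno:
--       int: El número más pequeño en la lista, si es vacía None.
--     """
--     menor = None
--     if entrada:
--         menor = max(entrada)
--         for numero in entrada:
--             if numero < menor:
--                 menor = numero
--     return menor
-- ===== SOURCE B (Python) =====
-- def encontrar_menor(entrada: list) -> int:
--     """Sort-based re-implementation: minimum = first element of the ascending sort."""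
--     if not entrada:
--         return None
--     return sorted(entrada)[0]
-- ===== Notes on version B (the rewrite author's own statement) =====
-- stated objective: simpler
-- what changed: Replaces A's max-then-scan (compute the maximum, then a comparison loop lowering it) by sorting the list ascending and returning its first element.
import Mathlib
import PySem

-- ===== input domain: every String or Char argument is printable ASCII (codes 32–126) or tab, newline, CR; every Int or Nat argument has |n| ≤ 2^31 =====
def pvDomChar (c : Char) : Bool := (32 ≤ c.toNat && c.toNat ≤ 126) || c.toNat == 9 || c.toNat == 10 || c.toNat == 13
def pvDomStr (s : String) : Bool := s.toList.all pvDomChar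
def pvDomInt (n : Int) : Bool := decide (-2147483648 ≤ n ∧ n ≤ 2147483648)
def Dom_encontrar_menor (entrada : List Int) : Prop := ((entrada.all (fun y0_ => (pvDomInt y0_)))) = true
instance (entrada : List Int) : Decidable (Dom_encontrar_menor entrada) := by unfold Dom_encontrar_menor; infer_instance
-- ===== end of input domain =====

-- B changes the algorithm: sort ascending and take the first element, instead of A's
-- max-then-lowering comparison scan (simpler, one line after the empty guard).

-- ===== PORT A =====
def encontrar_menor (entrada : List Int) : Option Int :=
  -- menor = None; if entrada: menor = max(entrada); for numero in entrada: if numero < menor: menor = numero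
  match entrada with
  | [] => none
  | _ =>
    match PySem.List.max? entrada (fun y => y) with
    | none => none
    | some m =>
      some (entrada.foldl (fun menor numero => if numero < menor then numero else menor) m)

-- ===== PORT B =====
def encontrar_menor_alt (entrada : List Int) : Option Int :=
  if entrada = [] then none
  else (PySem.List.sorted entrada (fun y => y) false).head?

-- ===== PRECONDITION & SPEC =====
def Spec_encontrar_menor (entrada : List Int) (out : Option Int) : Prop := out = encontrar_menor_alt entrada
instance (entrada : List Int) (out : Option Int) : Decidable (Spec_encontrar_menor entrada out) := by unfold Spec_encontrar_menor; infer_instance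

-- ===== CLAIM (what is proved, stated in full; the proofs are below) =====
def Claim_equal_encontrar_menor : Prop := ∀ (entrada : List Int), Dom_encontrar_menor entrada → Spec_encontrar_menor entrada (encontrar_menor entrada)

-- ===== LEMMAS AND PROOFS =====

lemma foldl_min_mem (t : List Int) : ∀ x : Int, t.foldl min x ∈ x :: t := by
  induction t with
  | nil => intro x; simp
  | cons y ys ih =>
    intro x
    have h := ih (min x y)
    simp only [List.foldl_cons, List.mem_cons] at *
    rcases h with h | h
    · rcases le_total x y with hxy | hxy
      · left; rw [h, min_eq_left hxy]
      · right; left; rw [h, min_eq_right hxy]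
    · right; right; exact h

lemma foldl_min_le (t : List Int) : ∀ x : Int, ∀ y ∈ x :: t, t.foldl min x ≤ y := by
  induction t with
  | nil => intro x y hy; simp at hy; simp [hy]
  | cons z zs ih =>
    intro x y hy
    simp only [List.foldl_cons]
    rcases List.mem_cons.mp hy with h | h
    · rw [h]
      exact le_trans (ih (min x z) _ (List.mem_cons_self ..)) (min_le_left _ _)
    · rcases List.mem_cons.mp h with h | h
      · rw [h]
        exact le_trans (ih (min x z) _ (List.mem_cons_self ..)) (min_le_right _ _)
      · exact ih (min x z) _ (List.mem_cons.mpr (Or.inr h))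

lemma a_body_eq (x : Int) (t : List Int) :
    encontrar_menor (x :: t) = some (t.foldl min x) := by
  have hmax : PySem.List.max? (x :: t) (fun y => y) = some (t.foldl max x) :=
    PySem.List.max?_id_cons x t
  have hfun : (fun (menor numero : Int) => if numero < menor then numero else menor)
      = fun m n => min m n := by
    funext m n; simp [min_def]; split_ifs <;> omega
  have hxle : x ≤ t.foldl max x := (PySem.List.le_foldl_max t x).1
  simp only [encontrar_menor, hmax, hfun, List.foldl_cons, min_eq_right hxle]

lemma b_body_eq (x : Int) (t : List Int) :
    encontrar_menor_alt (x :: t) = some (t.foldl min x) := by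
  have hperm : (PySem.List.sorted (x :: t) (fun y => y) false).Perm (x :: t) :=
    PySem.List.sorted_perm (x :: t) (fun y => y) false
  have hpw : (PySem.List.sorted (x :: t) (fun y => y) false).Pairwise
      (fun a b => (fun y => y) a ≤ (fun y => y) b) := PySem.List.sorted_pairwise (x :: t) (fun y => y)
  cases hs : PySem.List.sorted (x :: t) (fun y => y) false with
  | nil => rw [hs] at hperm; exact absurd hperm.symm.length_eq (by simp)
  | cons h rest =>
    rw [hs] at hperm hpw
    have hmem : h ∈ x :: t := hperm.mem_iff.mp (List.mem_cons_self ..)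
    have hle : ∀ y ∈ x :: t, h ≤ y := by
      intro y hy
      rcases List.mem_cons.mp (hperm.mem_iff.mpr hy) with h' | h'
      · omega
      · exact (List.pairwise_cons.mp hpw).1 y h'
    have h1 : h ≤ t.foldl min x := hle _ (foldl_min_mem t x)
    have h2 : t.foldl min x ≤ h := foldl_min_le t x h hmem
    simp [encontrar_menor_alt, hs]
    omega

-- ===== VERDICT (by name: the statement is the Claim_ definition above) =====
theorem encontrar_menor_spec : Claim_equal_encontrar_menor := by
  intro entrada _
  unfold Spec_encontrar_menor
  cases entrada with
  | nil => rfl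
  | cons x t => rw [a_body_eq, b_body_eq]
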